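-- pv_equiv track=rewrite | github.com/SYeon-424/GBlocks | gblock.py | gap_pattern_from_aligned_base
-- ===== SOURCE A (Python) =====
-- def gap_pattern_from_aligned_base(base_ref: str, aln_base: str):
--     L=len(base_ref); gaps_before=[0]*(L+1); i_base=0; run=0
--     for ch in aln_base:
--         if ch=='-': run+=1
--         else:
--             if i_base<L: gaps_before[i_base]+=run
--             run=0; i_base+=1
--     gaps_before[L]+=run
--     return gaps_before
-- ===== SOURCE B (Python) =====
-- def gap_pattern_from_aligned_base(base_ref: str, aln_base: str):
--     L = len(base_ref)
--     positions = [i for i, ch in enumerate(aln_base) if ch != '-']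
--     gaps_before = [0] * (L + 1)
--     prev = -1
--     for j, pos in enumerate(positions):
--         if j < L:
--             gaps_before[j] += pos - prev - 1
--         prev = pos
--     gaps_before[L] += len(aln_base) - prev - 1
--     return gaps_before
-- ===== Notes on version B (the rewrite author's own statement) =====
-- stated objective: alternative
-- what changed: B first builds an explicit index of non-gap positions, then derives each gap run as the difference between consecutive base positions (and the trailing run from the last position), instead of A's single pass with a running gap accumulator and base counter.
import Mathlib
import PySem

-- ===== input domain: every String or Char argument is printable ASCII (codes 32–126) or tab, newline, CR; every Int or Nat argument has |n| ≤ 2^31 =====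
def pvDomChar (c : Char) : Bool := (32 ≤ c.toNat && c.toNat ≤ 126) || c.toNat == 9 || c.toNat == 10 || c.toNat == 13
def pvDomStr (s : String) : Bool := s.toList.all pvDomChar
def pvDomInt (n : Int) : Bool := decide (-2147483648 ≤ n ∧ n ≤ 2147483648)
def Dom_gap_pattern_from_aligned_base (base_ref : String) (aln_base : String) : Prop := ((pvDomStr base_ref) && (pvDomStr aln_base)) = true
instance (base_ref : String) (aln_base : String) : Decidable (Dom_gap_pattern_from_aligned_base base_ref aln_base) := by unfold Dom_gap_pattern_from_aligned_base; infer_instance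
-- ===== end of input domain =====

-- B computes each gap run as the difference of consecutive non-gap positions (explicit position
-- index) instead of A's running accumulator; same cost, different decomposition.

-- gaps[i] += v  (index always in range where used)
def pvAddAt (g : List Int) (i : Nat) (v : Int) : List Int := g.set i (g.getD i 0 + v)

-- ===== PORT A =====
-- the for-loop of A, state (gaps_before, i_base, run)
def pvAloop (L : Nat) : List Char → List Int → Nat → Int → (List Int × Nat × Int)
  | [], g, i, run => (g, i, run)
  | ch :: cs, g, i, run =>
    if ch = '-' then pvAloop L cs g i (run + 1)
    else pvAloop L cs (if i < L then pvAddAt g i run else g) (i + 1) 0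

def gap_pattern_from_aligned_base (base_ref : String) (aln_base : String) : List Int :=
  let L := base_ref.toList.length
  let (g, _, run) := pvAloop L aln_base.toList (List.replicate (L + 1) 0) 0 0
  pvAddAt g L run

-- ===== PORT B =====
-- positions = [i for i, ch in enumerate(aln_base) if ch != '-'], collected at offset p
def pvPosOf : List Char → Nat → List Nat
  | [], _ => []
  | ch :: cs, p => if ch ≠ '-' then p :: pvPosOf cs (p + 1) else pvPosOf cs (p + 1)

-- the for-loop of B over enumerate(positions), state (gaps_before, prev), j the enumeration index
def pvBloop (L : Nat) : List Nat → Nat → List Int → Int → (List Int × Int)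
  | [], _, g, prev => (g, prev)
  | pos :: ps, j, g, prev =>
    pvBloop L ps (j + 1) (if j < L then pvAddAt g j ((pos : Int) - prev - 1) else g) (pos : Int)

def gap_pattern_from_aligned_base_alt (base_ref : String) (aln_base : String) : List Int :=
  let L := base_ref.toList.length
  let positions := pvPosOf aln_base.toList 0
  let (g, prev) := pvBloop L positions 0 (List.replicate (L + 1) 0) (-1)
  pvAddAt g L ((aln_base.toList.length : Int) - prev - 1)

-- ===== PRECONDITION & SPEC =====
def Spec_gap_pattern_from_aligned_base (base_ref : String) (aln_base : String) (out : List Int) : Prop := out = gap_pattern_from_aligned_base_alt base_ref aln_base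
instance (base_ref : String) (aln_base : String) (out : List Int) : Decidable (Spec_gap_pattern_from_aligned_base base_ref aln_base out) := by unfold Spec_gap_pattern_from_aligned_base; infer_instance

-- ===== CLAIM (what is proved, stated in full; the proofs are below) =====
def Claim_equal_gap_pattern_from_aligned_base : Prop := ∀ (base_ref : String) (aln_base : String), Dom_gap_pattern_from_aligned_base base_ref aln_base → Spec_gap_pattern_from_aligned_base base_ref aln_base (gap_pattern_from_aligned_base base_ref aln_base)

-- ===== LEMMAS AND PROOFS =====

-- cursor invariant: A's running `run` equals p - prev - 1 where p is the absolute position of the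
-- next character and prev the position of the last base (-1 if none); then finishing A's loop and
-- adding the final run at L equals finishing B's loop over the remaining positions and adding the
-- trailing difference at L.
theorem pv_key (L : Nat) : ∀ (cs : List Char) (g : List Int) (i : Nat) (run prev : Int) (p : Nat),
    run = (p : Int) - prev - 1 →
    (let (g', _, run') := pvAloop L cs g i run; pvAddAt g' L run')
      = (let (g'', prev') := pvBloop L (pvPosOf cs p) i g prev
         pvAddAt g'' L (((p + cs.length : Nat) : Int) - prev' - 1)) := by
  intro cs
  induction cs with
  | nil =>
    intro g i run prev p h
    simp [pvAloop, pvPosOf, pvBloop, h]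
  | cons ch cs ih =>
    intro g i run prev p h
    by_cases hch : ch = '-'
    · simp only [pvAloop, pvPosOf, hch, ne_eq, not_true_eq_false, if_false]
      have := ih g i (run + 1) prev (p + 1) (by push_cast; omega)
      simpa [List.length_cons, Nat.add_comm, Nat.add_left_comm, Nat.add_assoc] using this
    · simp only [pvAloop, pvPosOf, hch, ne_eq, not_false_eq_true, if_true]
      simp only [pvBloop]
      have := ih (if i < L then pvAddAt g i run else g) (i + 1) 0 (p : Int) (p + 1)
        (by push_cast; omega)
      rw [h] at this ⊢
      simpa [List.length_cons, Nat.add_comm, Nat.add_left_comm, Nat.add_assoc] using this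

-- ===== VERDICT (by name: the statement is the Claim_ definition above) =====
theorem gap_pattern_from_aligned_base_spec : Claim_equal_gap_pattern_from_aligned_base := by
  intro base_ref aln_base _
  unfold Spec_gap_pattern_from_aligned_base
  unfold gap_pattern_from_aligned_base gap_pattern_from_aligned_base_alt
  have := pv_key base_ref.toList.length aln_base.toList
    (List.replicate (base_ref.toList.length + 1) 0) 0 0 (-1) 0 (by norm_num)
  simpa using this
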